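-- pv_equiv track=rewrite | github.com/Foninho-Projetao/speech-therapist-ai | mediapipe_classification.py | count_true_groups
-- ===== SOURCE A (Python) =====
-- def count_true_groups(lst, max_false_gap=5):
--     group_count = 0
--     in_group = False
--     false_count = 0
--
--     for val in lst:
--         if val:
--             if not in_group:
--                 # Start of a new group
--                 group_count += 1
--                 in_group = True
--             false_count = 0  # Reset false counter when we see a True
--         else:
--             if in_group:
--                 false_count += 1
--                 if false_count > max_false_gap:
--                     in_group = False  # End current group if gap too large
--                     false_count = 0
--
--     return group_count
-- ===== SOURCE B (Python) =====
-- def count_true_groups(lst, max_false_gap=5):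
--     positions = [i for i, v in enumerate(lst) if v]
--     if not positions:
--         return 0
--     count = 1
--     for prev, cur in zip(positions, positions[1:]):
--         gap = cur - prev - 1
--         if gap > 0 and gap > max_false_gap:
--             count += 1
--     return count
-- ===== Notes on version B (the rewrite author's own statement) =====
-- stated objective: simpler
-- what changed: Replaces the streaming in_group/false_count state machine with a two-pass decomposition: collect true indices, then count gaps between consecutive true indices that exceed the tolerance.
import Mathlib
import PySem

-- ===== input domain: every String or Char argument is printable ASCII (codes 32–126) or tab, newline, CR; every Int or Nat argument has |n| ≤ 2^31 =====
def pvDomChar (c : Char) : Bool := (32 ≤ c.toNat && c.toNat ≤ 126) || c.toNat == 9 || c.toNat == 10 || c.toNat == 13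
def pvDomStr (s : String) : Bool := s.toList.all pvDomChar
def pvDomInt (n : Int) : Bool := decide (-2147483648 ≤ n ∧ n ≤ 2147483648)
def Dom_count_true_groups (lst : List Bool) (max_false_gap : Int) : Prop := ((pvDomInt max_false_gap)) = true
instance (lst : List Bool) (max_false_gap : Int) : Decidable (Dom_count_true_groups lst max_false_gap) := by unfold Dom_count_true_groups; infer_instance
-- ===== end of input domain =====

-- B replaces A's streaming in_group/false_count state machine by a two-pass decomposition
-- (collect true indices, then count over-tolerance gaps between consecutive ones); objective: simpler.

-- ===== PORT A =====
-- loop body of A, as a named helper (state = (group_count, in_group, false_count))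
def stepA (max_false_gap : Int) (s : Int × Bool × Int) (val : Bool) : Int × Bool × Int :=
  match s with
  | (group_count, in_group, false_count) =>
    if val then
      if ¬ in_group then (group_count + 1, true, 0)
      else (group_count, in_group, 0)
    else
      if in_group then
        if false_count + 1 > max_false_gap then (group_count, false, 0)
        else (group_count, in_group, false_count + 1)
      else (group_count, in_group, false_count)

def count_true_groups (lst : List Bool) (max_false_gap : Int) : Int :=
  (lst.foldl (stepA max_false_gap) (0, false, 0)).1

-- ===== PORT B =====
def count_true_groups_alt (lst : List Bool) (max_false_gap : Int) : Int :=
  let positions : List Int := (lst.zipIdx.filter (fun p => p.1)).map (fun p => (p.2 : Int))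
  match positions with
  | [] => 0
  | _ :: _ =>
    (positions.zip positions.tail).foldl
      (fun (count : Int) pr =>
        let gap := pr.2 - pr.1 - 1
        if gap > 0 ∧ gap > max_false_gap then count + 1 else count)
      1

-- ===== PRECONDITION & SPEC =====
def Spec_count_true_groups (lst : List Bool) (max_false_gap : Int) (out : Int) : Prop := out = count_true_groups_alt lst max_false_gap
instance (lst : List Bool) (max_false_gap : Int) (out : Int) : Decidable (Spec_count_true_groups lst max_false_gap out) := by unfold Spec_count_true_groups; infer_instance

-- ===== CLAIM (what is proved, stated in full; the proofs are below) =====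
def Claim_equal_count_true_groups : Prop := ∀ (lst : List Bool) (max_false_gap : Int), Dom_count_true_groups lst max_false_gap → Spec_count_true_groups lst max_false_gap (count_true_groups lst max_false_gap)

-- ===== LEMMAS AND PROOFS =====

-- A's loop as structural recursion on (in_group, false_count): number of group starts in the rest.
def groupsRest (mfg : Int) : List Bool → Bool → Int → Int
  | [], _, _ => 0
  | true :: t, ing, _ => (if ing then 0 else 1) + groupsRest mfg t true 0
  | false :: t, ing, fc =>
      if ing then
        if fc + 1 > mfg then groupsRest mfg t false 0
        else groupsRest mfg t true (fc + 1)
      else groupsRest mfg t false fc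

-- B's gap-count as structural recursion carrying the previous true position.
def splits (mfg : Int) : Int → List Int → Int
  | _, [] => 0
  | prev, p :: r =>
      (if p - prev - 1 > 0 ∧ p - prev - 1 > mfg then 1 else 0) + splits mfg p r

def splitsTop (mfg : Int) : List Int → Int
  | [] => 0
  | p :: r => 1 + splits mfg p r

-- true positions of l, indices starting at n
def posFrom (l : List Bool) (n : Nat) : List Int :=
  ((l.zipIdx n).filter (fun p => p.1)).map (fun p => (p.2 : Int))

theorem stepA_true (mfg gc fc : Int) (ing : Bool) :
    stepA mfg (gc, ing, fc) true =
      if ¬ ing then (gc + 1, true, 0) else (gc, ing, 0) := rfl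

theorem stepA_false (mfg gc fc : Int) (ing : Bool) :
    stepA mfg (gc, ing, fc) false =
      if ing then
        if fc + 1 > mfg then (gc, false, 0) else (gc, ing, fc + 1)
      else (gc, ing, fc) := rfl

theorem groupsRest_true (mfg fc : Int) (t : List Bool) (ing : Bool) :
    groupsRest mfg (true :: t) ing fc = (if ing then 0 else 1) + groupsRest mfg t true 0 := rfl

theorem groupsRest_false (mfg fc : Int) (t : List Bool) (ing : Bool) :
    groupsRest mfg (false :: t) ing fc =
      if ing then
        if fc + 1 > mfg then groupsRest mfg t false 0
        else groupsRest mfg t true (fc + 1)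
      else groupsRest mfg t false fc := rfl

theorem posFrom_cons_true (t : List Bool) (n : Nat) :
    posFrom (true :: t) n = (n : Int) :: posFrom t (n + 1) := by
  simp [posFrom, List.zipIdx]

theorem posFrom_cons_false (t : List Bool) (n : Nat) :
    posFrom (false :: t) n = posFrom t (n + 1) := by
  simp [posFrom, List.zipIdx]

theorem posFrom_ge (l : List Bool) (n : Nat) :
    ∀ p ∈ posFrom l n, (n : Int) ≤ p := by
  induction l generalizing n with
  | nil => simp [posFrom]
  | cons b t ih =>
    cases b
    · rw [posFrom_cons_false]
      intro p hp
      have := ih (n + 1) p hp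
      push_cast at this ⊢; omega
    · rw [posFrom_cons_true]
      intro p hp
      rcases List.mem_cons.mp hp with h | hp
      · simp [h]
      · have := ih (n + 1) p hp
        push_cast at this ⊢; omega

-- splits depends on its previous-position argument only up to equality (index normalization)
theorem splits_arg (mfg x y : Int) (P : List Int) (h : x = y) :
    splits mfg x P = splits mfg y P := by rw [h]

-- A's state machine equals B's gap count, generalized over (start index, state).
theorem groupsRest_eq_splits (mfg : Int) (l : List Bool) :
    ∀ (n : Nat) (ing : Bool) (fc : Int), 0 ≤ fc → (fc ≤ mfg ∨ fc = 0) →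
      groupsRest mfg l ing fc =
        if ing then splits mfg ((n : Int) - 1 - fc) (posFrom l n)
        else splitsTop mfg (posFrom l n) := by
  induction l with
  | nil =>
    intro n ing fc _ _
    cases ing <;> simp [groupsRest, posFrom, splits, splitsTop]
  | cons b t ih =>
    intro n ing fc hfc0 hfc
    cases b
    · -- head false
      rw [posFrom_cons_false, groupsRest_false]
      cases ing with
      | false =>
        have h := ih (n + 1) false fc hfc0 hfc
        simpa using h
      | true =>
        simp only [if_true]
        by_cases hgap : fc + 1 > mfg
        · rw [if_pos hgap]
          have h := ih (n + 1) false 0 le_rfl (Or.inr rfl)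
          simp only [Bool.false_eq_true, if_false] at h
          rw [h]
          cases hP : posFrom t (n + 1) with
          | nil => simp [splits, splitsTop]
          | cons p r =>
            have hge : ((n : Int) + 1) ≤ p := by
              have := posFrom_ge t (n + 1) p (by rw [hP]; exact List.mem_cons_self)
              push_cast at this; omega
            simp only [splits, splitsTop]
            rw [if_pos (by constructor <;> omega)]
        · rw [if_neg hgap]
          have h := ih (n + 1) true (fc + 1) (by omega) (Or.inl (by omega))
          simp only [if_true] at h
          rw [h]
          exact splits_arg mfg _ _ _ (by push_cast; ring)
    · -- head true
      rw [posFrom_cons_true, groupsRest_true]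
      have h := ih (n + 1) true 0 le_rfl (Or.inr rfl)
      simp only [if_true] at h
      rw [h]
      cases ing with
      | false =>
        simp only [Bool.false_eq_true, if_false, splitsTop]
        rw [splits_arg mfg (((n + 1 : Nat) : Int) - 1 - 0) (n : Int) (posFrom t (n + 1))
              (by push_cast; ring)]
      | true =>
        simp only [if_true, splits]
        rw [if_neg (by rintro ⟨h1, h2⟩; omega)]
        rw [splits_arg mfg (((n + 1 : Nat) : Int) - 1 - 0) (n : Int) (posFrom t (n + 1))
              (by push_cast; ring)]

-- A's foldl, from any state, adds groupsRest to the accumulated count.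
theorem foldA_eq (mfg : Int) (l : List Bool) :
    ∀ (gc fc : Int) (ing : Bool),
      (l.foldl (stepA mfg) (gc, ing, fc)).1 = gc + groupsRest mfg l ing fc := by
  induction l with
  | nil => intro gc fc ing; simp [groupsRest]
  | cons b t ih =>
    intro gc fc ing
    rw [List.foldl_cons]
    cases b
    · rw [stepA_false, groupsRest_false]
      cases ing
      · simp only [Bool.false_eq_true, if_false]
        rw [ih]
      · simp only [if_true]
        by_cases hgap : fc + 1 > mfg
        · rw [if_pos hgap, if_pos hgap, ih]
        · rw [if_neg hgap, if_neg hgap, ih]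
    · rw [stepA_true, groupsRest_true]
      cases ing <;> simp [ih] <;> omega

-- B's foldl over zipped consecutive pairs is the splits recursion.
theorem foldB_eq (mfg : Int) (r : List Int) :
    ∀ (p : Int) (c : Int),
      (((p :: r).zip r).foldl
        (fun (count : Int) pr =>
          let gap := pr.2 - pr.1 - 1
          if gap > 0 ∧ gap > mfg then count + 1 else count)
        c) = c + splits mfg p r := by
  induction r with
  | nil => intro p c; simp [splits]
  | cons q r' ih =>
    intro p c
    simp only [List.zip_cons_cons, List.foldl_cons, splits]
    rw [ih]
    split_ifs <;> ring

-- ===== VERDICT (by name: the statement is the Claim_ definition above) =====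
theorem count_true_groups_spec : Claim_equal_count_true_groups := by
  intro lst mfg _
  unfold Spec_count_true_groups count_true_groups count_true_groups_alt
  rw [foldA_eq]
  have h := groupsRest_eq_splits mfg lst 0 false 0 le_rfl (Or.inr rfl)
  simp only [Bool.false_eq_true, if_false] at h
  rw [h]
  have hpos : ((lst.zipIdx.filter (fun p => p.1)).map (fun p => (p.2 : Int))) = posFrom lst 0 := rfl
  rw [hpos]
  cases hP : posFrom lst 0 with
  | nil => simp [splitsTop]
  | cons p r =>
    simp only [List.tail_cons, splitsTop]
    rw [foldB_eq]
    ring
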